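-- pv_equiv track=rewrite | github.com/Kistvan79/Prog2-Annet-Nakintu- | Testingground.py | minimum_days_to_print_statues
-- ===== SOURCE A (Python) =====
-- def minimum_days_to_print_statues(n):
--     current_printers = 1
--     current_day = 0
--     statues_printed = 0
--
--     while statues_printed < n:
--
--         statues_printed_today = current_printers
--
--         statues_printed += statues_printed_today
--         current_day += 1
--
--
--         current_printers += statues_printed_today
--
--         if statues_printed < n:
--             current_printers += 1
--
--     return current_day
-- ===== SOURCE B (Python) =====
-- def minimum_days_to_print_statues(n):
--     # Total statues after d days is 2**(d+1) - d - 2 in closed form, which is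
--     # monotone in d, so the answer is found by binary search instead of simulation.
--     if n <= 0:
--         return 0
--     lo, hi = 1, n.bit_length()
--     while lo < hi:
--         mid = (lo + hi) // 2
--         if (1 << (mid + 1)) - mid - 2 >= n:
--             hi = mid
--         else:
--             lo = mid + 1
--     return lo
-- ===== Notes on version B (the rewrite author's own statement) =====
-- stated objective: alternative
-- what changed: B replaces A's day-by-day simulation (printer register, conditional +1, running total) with a binary search over days using the closed-form cumulative total 2^(d+1)-d-2, bracketed by n.bit_length().
import Mathlib
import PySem

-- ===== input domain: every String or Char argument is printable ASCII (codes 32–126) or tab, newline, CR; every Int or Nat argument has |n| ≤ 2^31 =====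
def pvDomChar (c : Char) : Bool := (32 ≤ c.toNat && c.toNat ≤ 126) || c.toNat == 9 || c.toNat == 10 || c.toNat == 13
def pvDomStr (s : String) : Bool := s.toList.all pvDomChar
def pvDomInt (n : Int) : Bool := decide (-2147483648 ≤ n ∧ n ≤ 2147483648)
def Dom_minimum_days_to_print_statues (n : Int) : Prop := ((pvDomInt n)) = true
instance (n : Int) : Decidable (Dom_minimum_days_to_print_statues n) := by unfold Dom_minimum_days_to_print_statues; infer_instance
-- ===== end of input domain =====

-- B replaces A's day-by-day simulation by a binary search on the closed-form total 2^(d+1)-d-2; alternative algorithm, same cost in practice.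

-- ===== PORT A =====
-- A's while loop as fuel recursion; fuel n.toNat + 1 never runs out (each day adds ≥ 1 statue),
-- and the proof covers all fuel values anyway.
def pvLoopA (n : Int) : Nat → Int → Int → Int → Int
  | 0, _, day, _ => day
  | fuel + 1, printers, day, statues =>
    if statues < n then
      let today := printers
      let statues' := statues + today
      let day' := day + 1
      let printers' := printers + today
      let printers'' := if statues' < n then printers' + 1 else printers'
      pvLoopA n fuel printers'' day' statues'
    else day

def minimum_days_to_print_statues (n : Int) : Int :=
  pvLoopA n (n.toNat + 1) 1 0 0

-- ===== PORT B =====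
-- B's binary-search while loop; `(lo+hi)//2` is PySem.Int.floordiv, `1 << k` is `1 <<< k`.
-- Fuel PySem.Int.bitLength n bounds the iteration count (hi - lo starts at bitLength n - 1 and shrinks each turn).
def pvSearch (n : Int) : Nat → Int → Int → Int
  | 0, lo, _ => lo
  | fuel + 1, lo, hi =>
    if lo < hi then
      let mid := PySem.Int.floordiv (lo + hi) 2
      if n ≤ ((1 : Int) <<< (mid + 1).toNat) - mid - 2 then
        pvSearch n fuel lo mid
      else
        pvSearch n fuel (mid + 1) hi
    else lo

def minimum_days_to_print_statues_alt (n : Int) : Int :=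
  if n ≤ 0 then 0
  else pvSearch n (PySem.Int.bitLength n) 1 (PySem.Int.bitLength n)

-- ===== PRECONDITION & SPEC =====
def Spec_minimum_days_to_print_statues (n : Int) (out : Int) : Prop := out = minimum_days_to_print_statues_alt n
instance (n : Int) (out : Int) : Decidable (Spec_minimum_days_to_print_statues n out) := by unfold Spec_minimum_days_to_print_statues; infer_instance

-- ===== CLAIM (what is proved, stated in full; the proofs are below) =====
def Claim_equal_minimum_days_to_print_statues : Prop := ∀ (n : Int), Dom_minimum_days_to_print_statues n → Spec_minimum_days_to_print_statues n (minimum_days_to_print_statues n)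

-- ===== LEMMAS AND PROOFS =====

-- proof-side helper: A's loop with printers eliminated (day d carries total gN d)
def pvLoopAcc (n : Int) : Nat → Int → Int → Int
  | 0, day, _ => day
  | fuel + 1, day, total =>
    if total < n then
      pvLoopAcc n fuel (day + 1) (total + (2 ^ (day + 1).toNat - 1))
    else day

-- total statues after d full days, closed form
def pvTotal (d : Nat) : Int := 2 ^ (d + 1) - (d : Int) - 2

theorem pvTotal_succ (d : Nat) : pvTotal (d + 1) = pvTotal d + (2 ^ (d + 1) - 1) := by
  simp only [pvTotal, pow_succ]
  push_cast
  ring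

theorem pvTotal_mono {j k : Nat} (h : j ≤ k) : pvTotal j ≤ pvTotal k := by
  induction k with
  | zero => simp_all
  | succ m ih =>
    rcases Nat.lt_or_ge j (m + 1) with h' | h'
    · have := ih (by omega)
      have h2 : (0 : Int) ≤ 2 ^ (m + 1) - 1 := by
        have : (1 : Int) ≤ 2 ^ (m + 1) := one_le_pow₀ (by norm_num)
        omega
      rw [pvTotal_succ]; omega
    · have : j = m + 1 := by omega
      simp [this]

theorem pvTotal_ge_self (d : Nat) : (d : Int) ≤ pvTotal d := by
  induction d with
  | zero => simp [pvTotal]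
  | succ m ih =>
    rw [pvTotal_succ]
    have : (1 : Int) ≤ 2 ^ (m + 1) := one_le_pow₀ (by norm_num)
    push_cast
    omega

-- the target predicate and its witness for n ≥ 1
theorem pvEx (n : Int) (hn : 1 ≤ n) : ∃ k : Nat, n ≤ pvTotal k :=
  ⟨n.toNat, le_trans (by omega) (pvTotal_ge_self n.toNat)⟩

-- once the target is reached both A-side loops return the current day, for any fuel
theorem pvLoopA_done (n : Int) (fuel : Nat) (p d s : Int) (h : ¬ s < n) :
    pvLoopA n fuel p d s = d := by
  cases fuel with
  | zero => rfl
  | succ k => simp [pvLoopA, h]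

theorem pvLoopAcc_done (n : Int) (fuel : Nat) (d s : Int) (h : ¬ s < n) :
    pvLoopAcc n fuel d s = d := by
  cases fuel with
  | zero => rfl
  | succ k => simp [pvLoopAcc, h]

-- invariant: entering an iteration on day d (d ≥ 0), A's printer count is 2^(d+1) - 1,
-- which is exactly the next per-day term of the accumulator loop
theorem pvLoop_eq (n : Int) (fuel : Nat) :
    ∀ d s : Int, 0 ≤ d →
      pvLoopA n fuel (2 ^ (d.toNat + 1) - 1) d s = pvLoopAcc n fuel d s := by
  induction fuel with
  | zero => intro d s _; rfl
  | succ k ih =>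
    intro d s hd
    by_cases h : s < n
    · have htn : (d + 1).toNat = d.toNat + 1 := by omega
      have hstep : s + (2 ^ (d.toNat + 1) - 1) = s + (2 ^ (d + 1).toNat - 1) := by
        rw [htn]
      by_cases h2 : s + (2 ^ (d.toNat + 1) - 1) < n
      · have hp : 2 ^ (d.toNat + 1) - 1 + (2 ^ (d.toNat + 1) - 1) + 1
            = (2 : Int) ^ ((d + 1).toNat + 1) - 1 := by
          rw [htn, pow_succ 2 (d.toNat + 1)]; ring
        simp only [pvLoopA, pvLoopAcc, h, h2, if_pos]
        rw [hp, hstep, ih (d + 1) _ (by omega)]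
      · simp only [pvLoopA, pvLoopAcc, h, h2, if_pos, if_false]
        rw [pvLoopA_done n k _ _ _ h2, pvLoopAcc_done n k _ _ (hstep ▸ h2)]
    · simp [pvLoopA, pvLoopAcc, h]

-- the accumulator loop computes the least day whose closed-form total reaches n
theorem pvLoopAcc_find (n : Int) (hn : 1 ≤ n) (fuel : Nat) :
    ∀ d : Nat, d ≤ Nat.find (pvEx n hn) → Nat.find (pvEx n hn) - d < fuel →
      pvLoopAcc n fuel (d : Int) (pvTotal d) = (Nat.find (pvEx n hn) : Int) := by
  induction fuel with
  | zero => intro d _ hf; omega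
  | succ k ih =>
    intro d hd hf
    by_cases h : pvTotal d < n
    · have hdlt : d < Nat.find (pvEx n hn) := by
        rcases Nat.lt_or_ge d (Nat.find (pvEx n hn)) with h' | h'
        · exact h'
        · exact absurd (le_trans (Nat.find_spec (pvEx n hn)) (pvTotal_mono h')) (by omega)
      have htn : ((d : Int) + 1).toNat = d + 1 := by omega
      simp only [pvLoopAcc, h, if_pos]
      rw [htn, ← pvTotal_succ]
      have := ih (d + 1) (by omega) (by omega)
      push_cast at this ⊢
      exact this
    · have : Nat.find (pvEx n hn) ≤ d := Nat.find_min' (pvEx n hn) (by omega)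
      have hda : d = Nat.find (pvEx n hn) := by omega
      rw [pvLoopAcc_done n _ _ _ h, hda]

-- 1 <<< k = 2 ^ k on Int
theorem pvShift (k : Nat) : ((1 : Int) <<< k) = 2 ^ k := by
  rw [Int.shiftLeft_eq]; ring

-- the binary search returns the same least day
theorem pvSearch_find (n : Int) (hn : 1 ≤ n) (fuel : Nat) :
    ∀ lo hi : Int, 0 ≤ lo → lo ≤ (Nat.find (pvEx n hn) : Int) →
      (Nat.find (pvEx n hn) : Int) ≤ hi → (hi - lo).toNat ≤ fuel →
      pvSearch n fuel lo hi = (Nat.find (pvEx n hn) : Int) := by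
  induction fuel with
  | zero =>
    intro lo hi h0 hlo hhi hf
    have : lo = hi := by omega
    simp only [pvSearch]; omega
  | succ k ih =>
    intro lo hi h0 hlo hhi hf
    by_cases hlh : lo < hi
    · have hmb := PySem.Int.floordiv_two_mid_bounds (le_of_lt hlh)
      set mid := PySem.Int.floordiv (lo + hi) 2 with hmid
      have hmlt : mid < hi := by
        rw [hmid, PySem.Int.floordiv_lt_iff_lt_mul (by norm_num)]; omega
      have hm0 : 0 ≤ mid := by omega
      have hmtn : ((mid : Int) + 1).toNat = mid.toNat + 1 := by omega
      have hcond : (n ≤ ((1 : Int) <<< (mid + 1).toNat) - mid - 2) ↔ n ≤ pvTotal mid.toNat := by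
        rw [hmtn, pvShift, pvTotal]
        constructor <;> intro h <;> omega
      by_cases hc : n ≤ ((1 : Int) <<< (mid + 1).toNat) - mid - 2
      · have hfind : (Nat.find (pvEx n hn) : Int) ≤ mid := by
          have := Nat.find_min' (pvEx n hn) (hcond.mp hc)
          omega
        simp only [pvSearch, hlh, if_pos, ← hmid, hc, if_pos]
        exact ih lo mid h0 hlo hfind (by omega)
      · have hfind : mid + 1 ≤ (Nat.find (pvEx n hn) : Int) := by
          by_contra hcon
          have hle : Nat.find (pvEx n hn) ≤ mid.toNat := by omega
          have := le_trans (Nat.find_spec (pvEx n hn)) (pvTotal_mono hle)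
          exact hc (hcond.mpr this)
        simp only [pvSearch, hlh, if_pos, ← hmid, hc, if_false]
        exact ih (mid + 1) hi (by omega) hfind hhi (by omega)
    · have : lo = hi := by omega
      simp only [pvSearch, hlh, if_false]
      omega

-- bounds on the answer for n ≥ 1: 1 ≤ ans ≤ bitLength n
theorem pvAns_pos (n : Int) (hn : 1 ≤ n) : 1 ≤ Nat.find (pvEx n hn) := by
  rcases Nat.eq_zero_or_pos (Nat.find (pvEx n hn)) with h | h
  · have := Nat.find_spec (pvEx n hn)
    rw [h] at this
    simp [pvTotal] at this
    omega
  · exact h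

theorem pvAns_le_bitLength (n : Int) (hn : 1 ≤ n) :
    Nat.find (pvEx n hn) ≤ PySem.Int.bitLength n := by
  apply Nat.find_min'
  set b := PySem.Int.bitLength n with hb
  have hlt : n.natAbs < 2 ^ b := PySem.Int.lt_two_pow_bitLength n
  have hble : 2 ^ (b - 1) ≤ n.natAbs := PySem.Int.two_pow_bitLength_le n (by omega)
  have hbpos : 1 ≤ b := by
    by_contra h
    have : b = 0 := by omega
    rw [this] at hlt
    simp at hlt
    omega
  -- b ≤ n : since b - 1 < 2 ^ (b - 1) ≤ n
  have h1 : b - 1 < 2 ^ (b - 1) := Nat.lt_two_pow_self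
  have hbn : b ≤ n.natAbs := by omega
  have hna : (n.natAbs : Int) = n := Int.natAbs_of_nonneg (by omega)
  have hlt' : n < (2 : Int) ^ b := by
    calc n = (n.natAbs : Int) := hna.symm
      _ < (((2 : Nat) ^ b : Nat) : Int) := by exact_mod_cast hlt
      _ = (2 : Int) ^ b := by push_cast; ring
  have hP : (2 : Int) ^ (b + 1) = 2 * 2 ^ b := by ring
  rw [pvTotal]
  have hbn' : (b : Int) ≤ n := by omega
  omega

-- ===== VERDICT (by name: the statement is the Claim_ definition above) =====
theorem minimum_days_to_print_statues_spec : Claim_equal_minimum_days_to_print_statues := by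
  intro n _
  unfold Spec_minimum_days_to_print_statues minimum_days_to_print_statues minimum_days_to_print_statues_alt
  by_cases hn : n ≤ 0
  · rw [if_pos hn, pvLoopA_done n _ _ _ _ (by omega)]
  · rw [if_neg hn]
    have hn1 : 1 ≤ n := by omega
    have hA : pvLoopA n (n.toNat + 1) 1 0 0 = (Nat.find (pvEx n hn1) : Int) := by
      have h0 := pvLoop_eq n (n.toNat + 1) 0 0 (le_refl 0)
      have hfind_le : Nat.find (pvEx n hn1) ≤ n.toNat := by
        apply Nat.find_min'
        exact le_trans (by omega) (pvTotal_ge_self n.toNat)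
      have hacc := pvLoopAcc_find n hn1 (n.toNat + 1) 0 (by omega) (by omega)
      simp only [pvTotal] at hacc
      norm_num at h0 hacc
      rw [h0, hacc]; rfl
    rw [hA]
    have hans1 := pvAns_pos n hn1
    have hansb := pvAns_le_bitLength n hn1
    exact (pvSearch_find n hn1 (PySem.Int.bitLength n) 1 (PySem.Int.bitLength n)
      (by norm_num) (by exact_mod_cast hans1) (by exact_mod_cast hansb) (by omega)).symm
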